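-- pv_equiv track=rewrite | github.com/monaxov/example_repo | test_project/test001.py | find_odd_counter
-- ===== SOURCE A (Python) =====
-- def find_odd_counter(array: list[int]) -> int:
--     fd = {}
--     for n in array:
--         if n in fd:
--             fd[n] += 1
--         else:
--             fd[n] = 1
--     for k, v in fd.items():
--         if v % 2 == 1:
--             return k
-- ===== SOURCE B (Python) =====
-- def find_odd_counter(array: list[int]) -> int:
--     # Parity-toggle set: no counts are ever computed. An element is in `odd`
--     # iff it has been seen an odd number of times so far.
--     odd = set()
--     for n in array:
--         if n in odd:
--             odd.discard(n)
--         else: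
--             odd.add(n)
--     for n in array:
--         if n in odd:
--             return n
-- ===== Notes on version B (the rewrite author's own statement) =====
-- stated objective: alternative
-- what changed: Replaces the frequency dictionary by a parity-toggle set that never computes any count: each occurrence toggles the element's membership, so the surviving set is exactly the odd-count elements, and a second scan of the array returns the first element in it (preserving A's insertion-order tie-break).
-- outside the precondition, e.g. on find_odd_counter([1, 1]): A returns None, B returns None
import Mathlib
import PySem

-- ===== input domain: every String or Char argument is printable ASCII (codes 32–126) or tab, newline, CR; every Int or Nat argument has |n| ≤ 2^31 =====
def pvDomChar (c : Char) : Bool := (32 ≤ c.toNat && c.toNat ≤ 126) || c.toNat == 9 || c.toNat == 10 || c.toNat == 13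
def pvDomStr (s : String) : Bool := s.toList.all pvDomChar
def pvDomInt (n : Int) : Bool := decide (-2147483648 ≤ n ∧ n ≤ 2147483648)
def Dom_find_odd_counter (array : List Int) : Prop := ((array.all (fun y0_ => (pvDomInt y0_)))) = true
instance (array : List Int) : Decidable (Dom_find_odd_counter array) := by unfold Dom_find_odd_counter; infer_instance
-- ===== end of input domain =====

-- B replaces A's frequency dictionary by a parity-toggle set (no counts computed at all);
-- equivalence of the return value only.

-- ===== PORT A =====
-- the second loop of A: scan dict items, return the first key with odd value (0 = fell through, outside Pre_)
def findOddItem : List (Int × Int) → Int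
  | [] => 0
  | (k, v) :: rest => if PySem.Int.mod v 2 == 1 then k else findOddItem rest

def find_odd_counter (array : List Int) : Int :=
  let fd : PySem.Dict Int Int :=
    array.foldl (fun d n => if d.contains n then d.insert n (d.getD n 0 + 1) else d.insert n 1)
      PySem.Dict.empty
  findOddItem fd.items

-- ===== PORT B =====
-- first loop of B: toggle membership of n in the odd-parity set
def toggle (odd : PySem.Set Int) (n : Int) : PySem.Set Int :=
  if PySem.Set.contains odd n then PySem.Set.discard odd n else PySem.Set.add odd n

-- second loop of B: return the first array element in the odd set (0 = fell through, outside Pre_)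
def altGo (odd : PySem.Set Int) : List Int → Int
  | [] => 0
  | n :: rest => if PySem.Set.contains odd n then n else altGo odd rest

def find_odd_counter_alt (array : List Int) : Int :=
  let odd := array.foldl toggle PySem.Set.empty
  altGo odd array

-- ===== PRECONDITION & SPEC =====
-- Pre_ excludes arrays in which no element occurs an odd number of times: there Python A falls
-- through its loops and returns None, which is not a value of the declared int type (B does the same).
def Pre_find_odd_counter (array : List Int) : Prop := ∃ n ∈ array, array.count n % 2 = 1
instance (array : List Int) : Decidable (Pre_find_odd_counter array) := by unfold Pre_find_odd_counter; infer_instance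
def pvWitness_find_odd_counter : List Int := [2, 5, 2, 2]

def Spec_find_odd_counter (array : List Int) (out : Int) : Prop := out = find_odd_counter_alt array
instance (array : List Int) (out : Int) : Decidable (Spec_find_odd_counter array out) := by unfold Spec_find_odd_counter; infer_instance

-- ===== CLAIM (what is proved, stated in full; the proofs are below) =====
def Claim_equal_find_odd_counter : Prop := ∀ (array : List Int), Dom_find_odd_counter array → Pre_find_odd_counter array → Spec_find_odd_counter array (find_odd_counter array)

-- ===== LEMMAS AND PROOFS =====

-- the predicate A effectively tests, as a function of the element alone
def oddCnt (full : List Int) (n : Int) : Bool := PySem.Int.mod ((full.count n : Nat) : Int) 2 == 1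

theorem oddCnt_iff (full : List Int) (n : Int) : oddCnt full n = true ↔ Odd (full.count n) := by
  rw [oddCnt, beq_iff_eq, PySem.Int.mod_eq_emod_of_pos (by omega), Nat.odd_iff]
  omega

-- ---- A-side: A = first array element with odd count ----

theorem findOddItem_map (full : List Int) (l : List Int) :
    findOddItem (l.map (fun k => (k, (full.count k : Int)))) = (l.find? (oddCnt full)).getD 0 := by
  induction l with
  | nil => rfl
  | cons x xs ih =>
    simp only [List.map, findOddItem]
    show (if oddCnt full x then x else _) = _
    rw [List.find?]
    cases h : oddCnt full x <;> simp [ih]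

theorem fold_eq_counter (array : List Int) :
    array.foldl (fun d n => if d.contains n then d.insert n (d.getD n 0 + 1) else d.insert n 1)
      PySem.Dict.empty = PySem.Dict.counter array := by
  rw [← PySem.Dict.foldl_insert_getD_add_one_eq_counter]
  congr 1
  funext d n
  by_cases h : d.contains n
  · simp [h]
  · rw [if_neg (by simp [h])]
    simp [PySem.Dict.getD_of_not_contains, h]

theorem find?_filter_ne (p : Int → Bool) (x : Int) (hx : p x = false) (l : List Int) :
    (l.filter (fun y => !(y == x))).find? p = l.find? p := by
  induction l with
  | nil => rfl
  | cons a l ih =>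
    by_cases hax : a = x
    · subst hax
      simp [List.filter, List.find?, hx, ih]
    · rw [List.filter_cons_of_pos (by simp [hax]), List.find?, List.find?]
      cases hp : p a <;> simp [ih]

theorem ofList_cons' (x : Int) (xs : List Int) :
    PySem.Set.ofList (x :: xs) = x :: (PySem.Set.ofList xs).filter (fun y => !(y == x)) := by
  have h1 : PySem.Set.ofList (x :: xs) = PySem.Set.update [x] xs := by
    simp [PySem.Set.ofList_eq_foldl, PySem.Set.update, List.foldl_cons, PySem.Set.add]
  rw [h1, PySem.Set.update_eq_append_filter]
  simp only [List.singleton_append, List.cons.injEq, true_and]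
  apply List.filter_congr
  intro y _
  simp only [PySem.Set.contains]
  by_cases hy : y = x <;> simp [hy]

theorem find?_ofList (p : Int → Bool) (xs : List Int) :
    (PySem.Set.ofList xs).find? p = xs.find? p := by
  induction xs with
  | nil => rfl
  | cons x xs ih =>
    rw [ofList_cons', List.find?, List.find?]
    cases hp : p x
    · rw [find?_filter_ne p x hp, ih]
    · rfl

-- ---- B-side: the parity-toggle set holds exactly the odd-count elements ----

theorem mem_toggle (s : PySem.Set Int) (a x : Int) : x ∈ toggle s a ↔ Xor' (x ∈ s) (x = a) := by
  unfold toggle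
  by_cases h : a ∈ s
  · rw [if_pos ((PySem.Set.contains_iff s a).mpr h), PySem.Set.mem_discard]
    constructor
    · rintro ⟨hx, hne⟩; exact Or.inl ⟨hx, hne⟩
    · rintro (⟨hx, hne⟩ | ⟨rfl, hn⟩)
      · exact ⟨hx, hne⟩
      · exact absurd h hn
  · rw [if_neg (by simpa [PySem.Set.contains_iff] using h), PySem.Set.mem_add]
    constructor
    · rintro (hx | rfl)
      · exact Or.inl ⟨hx, fun e => h (e ▸ hx)⟩
      · exact Or.inr ⟨rfl, h⟩
    · rintro (⟨hx, _⟩ | ⟨rfl, _⟩)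
      · exact Or.inl hx
      · exact Or.inr rfl

theorem mem_foldl_toggle (l : List Int) (s : PySem.Set Int) (x : Int) :
    x ∈ l.foldl toggle s ↔ Xor' (x ∈ s) (Odd (l.count x)) := by
  induction l generalizing s with
  | nil => simp [Xor']
  | cons a l ih =>
    rw [List.foldl_cons, ih, List.count_cons]
    by_cases hxa : x = a
    · subst hxa
      rw [mem_toggle]
      simp [Nat.odd_add_one, Xor']
      tauto
    · rw [mem_toggle]
      simp [Xor', Ne.symm hxa]
      tauto

theorem contains_oddSet (array : List Int) (n : Int) :
    PySem.Set.contains (array.foldl toggle PySem.Set.empty) n = oddCnt array n := by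
  have h1 : PySem.Set.contains (array.foldl toggle PySem.Set.empty) n = true ↔ Odd (array.count n) := by
    rw [PySem.Set.contains_iff, mem_foldl_toggle]
    simp [PySem.Set.empty, Xor']
  rw [Bool.eq_iff_iff, h1, oddCnt_iff]

theorem altGo_eq_find? (odd : PySem.Set Int) (l : List Int) :
    altGo odd l = (l.find? (fun n => PySem.Set.contains odd n)).getD 0 := by
  induction l with
  | nil => rfl
  | cons x xs ih =>
    simp only [altGo]
    rw [List.find?]
    cases h : PySem.Set.contains odd x <;> simp [ih]

-- ===== VERDICT (by name: the statement is the Claim_ definition above) =====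
theorem find_odd_counter_spec : Claim_equal_find_odd_counter := by
  intro array _ _
  show find_odd_counter array = find_odd_counter_alt array
  unfold find_odd_counter find_odd_counter_alt
  rw [fold_eq_counter]
  show findOddItem (PySem.Dict.counter array).items = altGo (array.foldl toggle PySem.Set.empty) array
  rw [PySem.Dict.items_counter, findOddItem_map, altGo_eq_find?, find?_ofList]
  simp only [contains_oddSet]
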